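-- pv_equiv track=rewrite | github.com/SRmohakal/LeetCode | 2946-matrix-similarity-after-cyclic-shifts/2946-matrix-similarity-after-cyclic-shifts.py | areSimilar
-- ===== SOURCE A (Python) =====
-- def areSimilar(mat, k):
--     m, n = len(mat), len(mat[0])
--
--     for i in range(m):
--         for j in range(n):
--             if i % 2 == 0:
--                 new_j = (j - k) % n
--             else:
--                 new_j = (j + k) % n
--
--             if mat[i][j] != mat[i][new_j]:
--                 return False
--
--     return True
-- ===== SOURCE B (Python) =====
-- from math import gcd
--
-- def areSimilar(mat, k):
--     n = len(mat[0])
--     g = gcd(k, n)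
--     return all(row[j] == row[j % g] for row in mat for j in range(n))
-- ===== Notes on version B (the rewrite author's own statement) =====
-- stated objective: simpler
-- what changed: Instead of simulating the cyclic shift (parity branch, (j±k)%n index arithmetic), B computes g = gcd(k, n) once and checks that every row is periodic with period g via row[j] == row[j % g], which is equivalent for both shift directions.
-- outside the precondition, e.g. on areSimilar([[1, 2], [5]], 1): A returns False, B returns False; on areSimilar([[0, 0, 0, 0], [3, 4]], 3): A raises IndexError, B returns False
import Mathlib
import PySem

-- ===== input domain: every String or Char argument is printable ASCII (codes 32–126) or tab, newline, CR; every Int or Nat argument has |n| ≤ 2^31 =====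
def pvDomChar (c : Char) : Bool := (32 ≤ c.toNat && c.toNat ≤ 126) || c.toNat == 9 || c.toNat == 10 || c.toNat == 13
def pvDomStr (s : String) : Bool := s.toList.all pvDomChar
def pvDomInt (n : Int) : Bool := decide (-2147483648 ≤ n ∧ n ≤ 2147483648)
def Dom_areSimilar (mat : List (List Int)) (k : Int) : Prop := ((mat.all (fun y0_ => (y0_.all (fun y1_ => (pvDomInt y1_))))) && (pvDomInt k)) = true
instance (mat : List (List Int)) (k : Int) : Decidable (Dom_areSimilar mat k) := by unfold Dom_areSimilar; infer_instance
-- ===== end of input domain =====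

-- B replaces A's shift simulation (parity branch, (j±k)%n index arithmetic) by a single gcd-period test row[j] == row[j % gcd(k,n)]; the return value is proved equal on nonempty matrices whose rows are at least as long as the first row.

-- ===== PORT A =====
def areSimilar (mat : List (List Int)) (k : Int) : Bool :=
  let m := mat.length
  let n := (mat.headD []).length
  (List.range m).all (fun i =>
    (List.range n).all (fun j =>
      let row := mat.getD i []
      let new_j : Int :=
        if i % 2 = 0 then PySem.Int.mod ((j : Int) - k) (n : Int)
        else PySem.Int.mod ((j : Int) + k) (n : Int)
      PySem.List.pyGetD row (j : Int) 0 == PySem.List.pyGetD row new_j 0))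

-- ===== PORT B =====
def areSimilar_alt (mat : List (List Int)) (k : Int) : Bool :=
  let n := (mat.headD []).length
  let g := Int.gcd k (n : Int)
  mat.all (fun row =>
    (List.range n).all (fun j =>
      PySem.List.pyGetD row (j : Int) 0 == PySem.List.pyGetD row ((j % g : Nat) : Int) 0))

-- ===== PRECONDITION & SPEC =====
-- Pre_ excludes the empty matrix, on which A raises IndexError at mat[0], and ragged matrices with a
-- row shorter than the first row, on which A raises IndexError or returns False depending on where its
-- scan stops; B likewise raises or returns False there (where both happen to return they agree, but the
-- two scans raise at different points of the region).
def Pre_areSimilar (mat : List (List Int)) (k : Int) : Prop :=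
  mat ≠ [] ∧ ∀ row ∈ mat, (mat.headD []).length ≤ row.length
instance (mat : List (List Int)) (k : Int) : Decidable (Pre_areSimilar mat k) := by
  unfold Pre_areSimilar; infer_instance
def pvWitness_areSimilar : List (List Int) × Int := ([[1, 2], [3, 4]], 2)
def Spec_areSimilar (mat : List (List Int)) (k : Int) (out : Bool) : Prop := out = areSimilar_alt mat k
instance (mat : List (List Int)) (k : Int) (out : Bool) : Decidable (Spec_areSimilar mat k out) := by unfold Spec_areSimilar; infer_instance

-- ===== CLAIM (what is proved, stated in full; the proofs are below) =====
def Claim_equal_areSimilar : Prop := ∀ (mat : List (List Int)) (k : Int), Dom_areSimilar mat k → Pre_areSimilar mat k → Spec_areSimilar mat k (areSimilar mat k)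

-- ===== LEMMAS AND PROOFS =====

-- "row r is invariant under the cyclic shift by k on its first n entries"
def shiftInv (r : List Int) (n : Nat) (k : Int) : Prop :=
  ∀ j < n, r.getD j 0 = r.getD (((j : Int) + k)% (n : Int)).toNat 0

-- "row r is periodic with period g on its first n entries"
def per (r : List Int) (n g : Nat) : Prop :=
  ∀ j < n, r.getD j 0 = r.getD (j % g) 0

lemma per_to_shiftInv (r : List Int) (n : Nat) (k : Int)
    (h : per r n (Int.gcd k (n : Int))) : shiftInv r n k := by
  intro j hj
  have hn0 : (0 : Int) < (n : Int) := by exact_mod_cast Nat.zero_lt_of_lt hj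
  set g := Int.gcd k (n : Int) with hg
  obtain ⟨c, hc⟩ : ((g : Nat) : Int) ∣ k := by rw [hg]; exact Int.gcd_dvd_left k (n : Int)
  have hgn : ((g : Nat) : Int) ∣ (n : Int) := by rw [hg]; exact Int.gcd_dvd_right k (n : Int)
  set t : Int := ((j : Int) + k)% (n : Int) with htdef
  have ht0 : 0 ≤ t := Int.emod_nonneg _ (by omega)
  have htn : t < (n : Int) := Int.emod_lt_of_pos _ hn0
  have htoNat : t.toNat < n := by omega
  have hmodInt : t % ((g : Nat) : Int) = (j : Int) % ((g : Nat) : Int) := by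
    calc t % ((g : Nat) : Int) = ((j : Int) + k) % ((g : Nat) : Int) :=
          Int.emod_emod_of_dvd _ hgn
      _ = ((j : Int) + ((g : Nat) : Int) * c) % ((g : Nat) : Int) := by rw [hc]
      _ = (j : Int) % ((g : Nat) : Int) := by rw [Int.add_mul_emod_self_left]
  have hmod : t.toNat % g = j % g := by
    have h1 : ((t.toNat % g : Nat) : Int) = t % ((g : Nat) : Int) := by
      rw [Int.natCast_emod, Int.toNat_of_nonneg ht0]
    have h2 : ((j % g : Nat) : Int) = (j : Int) % ((g : Nat) : Int) := Int.natCast_emod j g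
    exact_mod_cast h1.trans (hmodInt.trans h2.symm)
  calc r.getD j 0 = r.getD (j % g) 0 := h j hj
    _ = r.getD (t.toNat % g) 0 := by rw [hmod]
    _ = r.getD t.toNat 0 := (h t.toNat htoNat).symm

lemma shiftInv_multi (r : List Int) (n : Nat) (k : Int) (h : shiftInv r n k) :
    ∀ (t : Int), ∀ j < n, r.getD j 0 = r.getD (((j : Int) + t * k)% (n : Int)).toNat 0 := by
  intro t
  induction t using Int.induction_on with
  | zero =>
    intro j hj
    have : ((j : Int) + 0 * k)% (n : Int) = (j : Int) := by
      rw [zero_mul, add_zero]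
      exact Int.emod_eq_of_lt (by positivity) (by exact_mod_cast hj)
    rw [this, Int.toNat_natCast]
  | succ t ih =>
    intro j hj
    have hn0 : (0 : Int) < (n : Int) := by exact_mod_cast Nat.zero_lt_of_lt hj
    set m : Int := ((j : Int) + (t : Int) * k)% (n : Int) with hm
    have hm0 : 0 ≤ m := Int.emod_nonneg _ (by omega)
    have hmn : m < (n : Int) := Int.emod_lt_of_pos _ hn0
    have hmnat : m.toNat < n := by omega
    have h2 := h m.toNat hmnat
    have h3 : (((m.toNat : Nat) : Int) + k)% (n : Int)
        = ((j : Int) + ((t : Int) + 1) * k)% (n : Int) := by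
      rw [Int.toNat_of_nonneg hm0, hm]
      conv_rhs => rw [show (j : Int) + ((t : Int) + 1) * k = ((j : Int) + (t : Int) * k) + k by ring]
      rw [Int.add_emod ((j : Int) + (t : Int) * k) k,
          Int.add_emod (((j : Int) + (t : Int) * k)% (n : Int)) k,
          Int.emod_emod_of_dvd _ (dvd_refl _)]
    rw [ih j hj, h2, h3]
  | pred t ih =>
    intro j hj
    have hn0 : (0 : Int) < (n : Int) := by exact_mod_cast Nat.zero_lt_of_lt hj
    set m : Int := ((j : Int) + (-(t : Int)) * k)% (n : Int) with hm
    have hm0 : 0 ≤ m := Int.emod_nonneg _ (by omega)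
    have hmn : m < (n : Int) := Int.emod_lt_of_pos _ hn0
    set p : Int := (m - k)% (n : Int) with hp
    have hp0 : 0 ≤ p := Int.emod_nonneg _ (by omega)
    have hpn : p < (n : Int) := Int.emod_lt_of_pos _ hn0
    have hpnat : p.toNat < n := by omega
    have h2 := h p.toNat hpnat
    -- ((p : Int) + k).emod n = m, so r[p.toNat] = r[m.toNat]
    have h3 : (((p.toNat : Nat) : Int) + k)% (n : Int) = m := by
      rw [Int.toNat_of_nonneg hp0, hp]
      rw [Int.add_emod ((m - k)% (n : Int)) k, Int.emod_emod_of_dvd _ (dvd_refl _),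
          ← Int.add_emod]
      rw [show m - k + k = m by ring]
      exact Int.emod_eq_of_lt hm0 hmn
    -- p = ((j : Int) + (-(t+1)) * k).emod n
    have h4 : p = ((j : Int) + (-(t : Int) - 1) * k)% (n : Int) := by
      rw [hp, hm]
      rw [Int.sub_emod (((j : Int) + (-(t : Int)) * k)% (n : Int)) k,
          Int.emod_emod_of_dvd _ (dvd_refl _), ← Int.sub_emod]
      congr 1
      ring
    have hjm := ih j hj
    rw [hjm, ← h4]
    have : r.getD p.toNat 0 = r.getD m.toNat 0 := by rw [h2, h3]
    exact this.symm

lemma shiftInv_to_per (r : List Int) (n : Nat) (k : Int)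
    (h : shiftInv r n k) : per r n (Int.gcd k (n : Int)) := by
  rcases Nat.eq_zero_or_pos n with hn | hn
  · intro j hj; omega
  set g := Int.gcd k (n : Int) with hgdef
  have hn0 : (0 : Int) < (n : Int) := by exact_mod_cast hn
  have hg0 : 0 < g := by
    rw [hgdef, Int.gcd_pos_iff]
    right; omega
  have hgn : g ∣ n := by
    have : ((g : Nat) : Int) ∣ ((n : Nat) : Int) := by rw [hgdef]; exact Int.gcd_dvd_right k (n : Int)
    exact_mod_cast this
  have gshift : ∀ j' < n, r.getD j' 0 = r.getD (((j' : Int) + (g : Int))% (n : Int)).toNat 0 := by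
    intro j' hj'
    have hmulti := shiftInv_multi r n k h (Int.gcdA k (n : Int)) j' hj'
    have hb : (j' : Int) + Int.gcdA k (n : Int) * k
        = ((j' : Int) + (g : Int)) + (n : Int) * (-(Int.gcdB k (n : Int))) := by
      have hab := Int.gcd_eq_gcd_ab k ((n : Nat) : Int)
      rw [hgdef]
      linear_combination -hab
    rw [hb, Int.add_mul_emod_self_left] at hmulti
    exact hmulti
  intro j
  induction j using Nat.strong_induction_on with
  | _ j ih =>
    intro hj
    by_cases hlt : j < g
    · rw [Nat.mod_eq_of_lt hlt]
    · rw [not_lt] at hlt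
      have hsub : j - g < j := by omega
      have hsubn : j - g < n := by omega
      have e1 : r.getD (j - g) 0 = r.getD ((j - g) % g) 0 := ih (j - g) hsub hsubn
      have e2 := gshift (j - g) hsubn
      have hidx : ((((j - g : Nat) : Int) + (g : Int))% (n : Int)).toNat = j := by
        have hc : (((j - g : Nat)) : Int) = (j : Int) - (g : Int) := by omega
        rw [hc, show (j : Int) - (g : Int) + (g : Int) = (j : Int) by ring,
            Int.emod_eq_of_lt (by positivity) (by exact_mod_cast hj), Int.toNat_natCast]
      rw [hidx] at e2
      have e3 : j % g = (j - g) % g := by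
        conv_lhs => rw [← Nat.sub_add_cancel hlt]
        rw [Nat.add_mod_right]
      rw [e3, ← e1, ← e2]

lemma shiftInv_iff_per (r : List Int) (n : Nat) (k : Int) :
    shiftInv r n k ↔ per r n (Int.gcd k (n : Int)) :=
  ⟨shiftInv_to_per r n k, per_to_shiftInv r n k⟩

-- pointwise-equal predicates give equal `all`s
lemma all_congr_mem {α : Type} (l : List α) (f g : α → Bool)
    (h : ∀ a ∈ l, f a = g a) : l.all f = l.all g := by
  induction l with
  | nil => rfl
  | cons x l ih =>
    simp only [List.all_cons, h x (List.mem_cons_self ..),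
      ih (fun a ha => h a (List.mem_cons_of_mem _ ha))]

-- `l.all G` as a loop over indices
lemma all_eq_range_all (l : List (List Int)) (G : List Int → Bool) :
    l.all G = (List.range l.length).all (fun i => G (l.getD i [])) := by
  induction l with
  | nil => rfl
  | cons x l ih =>
    simp [List.range_succ_eq_map, List.all_map, ih, Function.comp_def]

-- the inner loop of A over one row, as a Prop
lemma rowA_eq_true_iff (r : List Int) (n : Nat) (k' : Int) (hn : 0 < n) :
    ((List.range n).all (fun j =>
        PySem.List.pyGetD r (j : Int) 0 ==
          PySem.List.pyGetD r (PySem.Int.mod ((j : Int) + k') (n : Int)) 0) = true)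
      ↔ shiftInv r n k' := by
  have hn0 : (0 : Int) < (n : Int) := by exact_mod_cast hn
  rw [List.all_eq_true]
  have key : ∀ j : Nat, j < n →
      ((PySem.List.pyGetD r (j : Int) 0 ==
          PySem.List.pyGetD r (PySem.Int.mod ((j : Int) + k') (n : Int)) 0) = true
        ↔ r.getD j 0 = r.getD (((j : Int) + k') % (n : Int)).toNat 0) := by
    intro j hj
    rw [PySem.Int.mod_eq_emod_of_pos hn0]
    have hX : ((j : Int) + k') % (n : Int)
        = (((((j : Int) + k') % (n : Int)).toNat : Nat) : Int) :=
      (Int.toNat_of_nonneg (Int.emod_nonneg _ (by omega))).symm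
    conv_lhs => rw [hX]
    rw [PySem.List.pyGetD_natCast, PySem.List.pyGetD_natCast, beq_iff_eq]
  constructor
  · intro hall j hj
    exact (key j hj).mp (hall j (List.mem_range.mpr hj))
  · intro hs j hj
    rw [List.mem_range] at hj
    exact (key j hj).mpr (hs j hj)

-- the inner loop of B over one row, as a Prop
lemma rowB_eq_true_iff (r : List Int) (n g : Nat) :
    ((List.range n).all (fun j =>
        PySem.List.pyGetD r (j : Int) 0 == PySem.List.pyGetD r ((j % g : Nat) : Int) 0) = true)
      ↔ per r n g := by
  rw [List.all_eq_true]
  have key : ∀ j : Nat,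
      ((PySem.List.pyGetD r (j : Int) 0 == PySem.List.pyGetD r ((j % g : Nat) : Int) 0) = true
        ↔ r.getD j 0 = r.getD (j % g) 0) := by
    intro j
    rw [PySem.List.pyGetD_natCast, PySem.List.pyGetD_natCast, beq_iff_eq]
  constructor
  · intro hall j hj
    exact (key j).mp (hall j (List.mem_range.mpr hj))
  · intro hp j hj
    rw [List.mem_range] at hj
    exact (key j).mpr (hp j hj)

-- ===== VERDICT (by name: the statement is the Claim_ definition above) =====
theorem areSimilar_spec : Claim_equal_areSimilar := by
  intro mat k _hdom _hpre
  unfold Spec_areSimilar areSimilar areSimilar_alt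
  simp only []
  set n := (mat.headD []).length with hn
  set g := Int.gcd k (n : Int) with hg
  rcases Nat.eq_zero_or_pos n with hn0 | hn0
  · -- n = 0 : both sides are `all` of trivially-empty inner loops
    rw [hn0]
    rw [Bool.eq_iff_iff]
    simp
  -- n > 0
  rw [all_eq_range_all mat (fun row =>
      (List.range n).all (fun j =>
        PySem.List.pyGetD row (j : Int) 0 == PySem.List.pyGetD row ((j % g : Nat) : Int) 0))]
  apply all_congr_mem
  intro i hi
  rw [List.mem_range] at hi
  set r := mat.getD i [] with hr
  -- both inner `all`s are decided by the same Prop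
  have hB := rowB_eq_true_iff r n g
  by_cases hpar : i % 2 = 0
  · -- even row: new_j = (j - k) % n, i.e. shift by -k
    simp only [hpar, reduceIte]
    have hA : ((List.range n).all (fun j =>
        PySem.List.pyGetD r (j : Int) 0 ==
          PySem.List.pyGetD r (PySem.Int.mod ((j : Int) - k) (n : Int)) 0) = true)
        ↔ shiftInv r n (-k) := by
      have := rowA_eq_true_iff r n (-k) hn0
      simpa [sub_eq_add_neg] using this
    rw [Bool.eq_iff_iff, hA, hB]
    rw [show g = Int.gcd (-k) (n : Int) by rw [hg, Int.neg_gcd]]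
    exact shiftInv_iff_per r n (-k)
  · simp only [hpar, reduceIte]
    rw [Bool.eq_iff_iff, rowA_eq_true_iff r n k hn0, hB, hg]
    exact shiftInv_iff_per r n k
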